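-- pv_equiv track=rewrite | github.com/liamshamur909/project-1 | DB_module_pc.py | get_secondary_filename
-- ===== SOURCE A (Python) =====
-- def get_secondary_filename(arr, filename):
--
--     f = True
--     index = 0
--     for i in range(1, len(arr) + 1):
--         filename2 = filename + "(" + str(i) + ")"
--         for filename_arr in arr:
--             if(filename_arr == filename2):
--                 f = False
--         if(f == True):
--             return filename2
--         f = True
--         index = i
--
--     filename2 = filename + "(" + str(index + 1) + ")"
--     return filename2
-- ===== SOURCE B (Python) =====
-- def get_secondary_filename(arr, filename):
--     n = len(arr)
--     index_of = {}
--     for k in range(1, n + 2):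
--         index_of[filename + "(" + str(k) + ")"] = k
--     used = [False] * (n + 2)
--     for s in arr:
--         k = index_of.get(s)
--         if k is not None:
--             used[k] = True
--     k = 1
--     while used[k]:
--         k += 1
--     return filename + "(" + str(k) + ")"
-- ===== Notes on version B (the rewrite author's own statement) =====
-- stated objective: alternative
-- what changed: Inverts A's nested candidate-by-candidate probing: B builds a dict from each candidate name 'filename(k)' (k=1..n+1) to its index once, marks a boolean table in a single pass over arr via dict lookup, then scans the table for the first unmarked index.
import Mathlib
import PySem

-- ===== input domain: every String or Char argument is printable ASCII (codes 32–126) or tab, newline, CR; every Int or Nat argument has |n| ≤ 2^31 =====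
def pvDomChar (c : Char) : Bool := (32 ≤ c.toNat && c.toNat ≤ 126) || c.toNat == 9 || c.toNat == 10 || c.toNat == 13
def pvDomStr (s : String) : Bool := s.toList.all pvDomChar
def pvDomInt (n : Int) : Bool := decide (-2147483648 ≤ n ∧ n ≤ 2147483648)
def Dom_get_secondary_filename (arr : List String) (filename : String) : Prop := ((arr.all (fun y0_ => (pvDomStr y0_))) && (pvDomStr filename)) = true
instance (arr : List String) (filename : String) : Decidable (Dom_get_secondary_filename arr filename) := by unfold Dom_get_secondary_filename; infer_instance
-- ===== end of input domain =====

-- B inverts A's loops: it builds a dict from each candidate name "filename(k)" (k = 1..n+1) to its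
-- index once, marks a boolean table in ONE pass over arr, then scans the table for the first free
-- index — instead of A's candidate-by-candidate probing with an inner scan over arr per candidate.

-- ===== PORT A =====
-- inner 'for filename_arr in arr' loop setting the flag f
def pvAInner (arr : List String) (filename2 : String) : Bool :=
  arr.foldl (fun f filename_arr => if filename_arr == filename2 then false else f) true

-- outer 'for i in range(1, len(arr)+1)' loop carrying index, with the fallback after the loop
def pvALoop (arr : List String) (filename : String) : List Int → Int → String
  | [], index => filename ++ "(" ++ PySem.Int.toStr (index + 1) ++ ")"
  | i :: rest, index =>
      let filename2 := filename ++ "(" ++ PySem.Int.toStr i ++ ")"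
      if pvAInner arr filename2 then filename2 else pvALoop arr filename rest i

def get_secondary_filename (arr : List String) (filename : String) : String :=
  pvALoop arr filename (PySem.List.pyRange 1 ((arr.length : Int) + 1) 1) 0

-- ===== PORT B =====
-- 'for k in range(1, n + 2): index_of[filename + "(" + str(k) + ")"] = k'
def pvBDict (filename : String) (n : Nat) : PySem.Dict String Int :=
  (PySem.List.pyRange 1 ((n : Int) + 2) 1).foldl
    (fun d k => d.insert (filename ++ "(" ++ PySem.Int.toStr k ++ ")") k) PySem.Dict.empty

-- 'for s in arr: k = index_of.get(s); if k is not None: used[k] = True'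
-- (the dict only ever stores k ≥ 1, so 'k.toNat' is that nonnegative index)
def pvBMark (d : PySem.Dict String Int) (arr : List String) (used0 : List Bool) : List Bool :=
  arr.foldl (fun u s =>
    match d.get? s with
    | some k => u.set k.toNat true
    | none => u) used0

-- 'k = 1; while used[k]: k += 1' — fuel used.length suffices (proved unreachable otherwise)
def pvBWhile (used : List Bool) : Nat → Nat → Nat
  | k, 0 => k
  | k, fuel + 1 => if used.getD k false then pvBWhile used (k + 1) fuel else k

def get_secondary_filename_alt (arr : List String) (filename : String) : String :=
  let n := arr.length
  let d := pvBDict filename n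
  let used := pvBMark d arr (List.replicate (n + 2) false)
  let k := pvBWhile used 1 used.length
  filename ++ "(" ++ PySem.Int.toStr (k : Int) ++ ")"

-- ===== PRECONDITION & SPEC =====
def Spec_get_secondary_filename (arr : List String) (filename : String) (out : String) : Prop := out = get_secondary_filename_alt arr filename
instance (arr : List String) (filename : String) (out : String) : Decidable (Spec_get_secondary_filename arr filename out) := by unfold Spec_get_secondary_filename; infer_instance

-- ===== CLAIM (what is proved, stated in full; the proofs are below) =====
def Claim_equal_get_secondary_filename : Prop := ∀ (arr : List String) (filename : String), Dom_get_secondary_filename arr filename → Spec_get_secondary_filename arr filename (get_secondary_filename arr filename)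

-- ===== LEMMAS AND PROOFS =====

-- the candidate string filename + "(" + str(i) + ")"
def pvC (filename : String) (i : Int) : String :=
  filename ++ "(" ++ PySem.Int.toStr i ++ ")"

-- decimal digit characters are distinct
theorem pvDigitChar_inj : ∀ m < 10, ∀ n < 10, Nat.digitChar m = Nat.digitChar n → m = n := by
  decide

-- Nat.toDigits 10 is injective
theorem pvToDigits_inj (m : Nat) : ∀ n : Nat, Nat.toDigits 10 m = Nat.toDigits 10 n → m = n := by
  induction m using Nat.strong_induction_on with
  | _ m ih =>
    intro n h
    have em := Nat.toDigits_eq_if (b := 10) (n := m) (by norm_num)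
    have en := Nat.toDigits_eq_if (b := 10) (n := n) (by norm_num)
    rw [em, en] at h
    by_cases hm : m < 10 <;> by_cases hn : n < 10
    · rw [if_pos hm, if_pos hn] at h
      exact pvDigitChar_inj m hm n hn (List.singleton_injective h)
    · rw [if_pos hm, if_neg hn] at h
      have hp : 0 < (Nat.toDigits 10 (n / 10)).length := Nat.length_toDigits_pos
      have hlen := congrArg List.length h
      simp only [List.length_singleton, List.length_append] at hlen
      omega
    · rw [if_neg hm, if_pos hn] at h
      have hp : 0 < (Nat.toDigits 10 (m / 10)).length := Nat.length_toDigits_pos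
      have hlen := congrArg List.length h
      simp only [List.length_singleton, List.length_append] at hlen
      omega
    · rw [if_neg hm, if_neg hn] at h
      have h2 := List.append_inj' h (by simp)
      have hd : m / 10 = n / 10 :=
        ih (m / 10) (Nat.div_lt_self (by omega) (by norm_num)) (n / 10) h2.1
      have hc : m % 10 = n % 10 :=
        pvDigitChar_inj (m % 10) (Nat.mod_lt _ (by norm_num)) (n % 10)
          (Nat.mod_lt _ (by norm_num)) (List.singleton_injective h2.2)
      omega

-- candidate strings for distinct nonnegative indices are distinct
theorem pvC_inj (filename : String) {i j : Int} (hi : 0 ≤ i) (hj : 0 ≤ j)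
    (h : pvC filename i = pvC filename j) : i = j := by
  unfold pvC at h
  have h' := congrArg String.toList h
  simp only [String.toList_append, PySem.Int.toList_toStr] at h'
  rw [List.append_assoc, List.append_assoc, List.append_assoc, List.append_assoc] at h'
  have h1 := List.append_cancel_left h'
  have h2 := List.append_cancel_left h1
  have h3 := List.append_cancel_right h2
  unfold PySem.Int.toChars at h3
  rw [if_neg (by omega), if_neg (by omega)] at h3
  have := pvToDigits_inj i.toNat j.toNat h3
  omega

-- ---- the dict built by B ----

theorem pvBDict_items (filename : String) (n : Nat) :
    (pvBDict filename n).items =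
      (PySem.List.pyRange 1 ((n : Int) + 2) 1).map (fun k => (pvC filename k, k)) := by
  unfold pvBDict
  have h := PySem.Dict.items_foldl_insert_fresh
      (l := PySem.List.pyRange 1 ((n : Int) + 2) 1)
      (k := fun a => pvC filename a) (v := fun a => a) (d := PySem.Dict.empty)
      (by intro a _; exact PySem.Dict.contains_empty _)
      (by
        refine List.Nodup.map_on ?_ (PySem.List.nodup_pyRange_one _ _)
        intro x hx y hy hxy
        rw [PySem.List.mem_pyRange_one] at hx hy
        exact pvC_inj filename (by omega) (by omega) hxy)
  simpa [pvC, show (PySem.Dict.empty : PySem.Dict String Int).items = [] from rfl] using h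

theorem pvBDict_keys_nodup (filename : String) (n : Nat) :
    (pvBDict filename n).keys.Nodup := by
  show ((pvBDict filename n).items.map (·.1)).Nodup
  rw [pvBDict_items, List.map_map]
  refine List.Nodup.map_on ?_ (PySem.List.nodup_pyRange_one _ _)
  intro x hx y hy hxy
  rw [PySem.List.mem_pyRange_one] at hx hy
  exact pvC_inj filename (by omega) (by omega) hxy

theorem pvBDict_get_cand (filename : String) (n : Nat) {i : Int}
    (h1 : 1 ≤ i) (h2 : i ≤ (n : Int) + 1) :
    (pvBDict filename n).get? (pvC filename i) = some i := by
  refine PySem.Dict.get?_of_mem_items _ ?_ (pvBDict_keys_nodup filename n)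
  rw [pvBDict_items, List.mem_map]
  exact ⟨i, by rw [PySem.List.mem_pyRange_one]; omega, rfl⟩

theorem pvBDict_get_some (filename : String) (n : Nat) {s : String} {k : Int}
    (h : (pvBDict filename n).get? s = some k) :
    s = pvC filename k ∧ 1 ≤ k ∧ k ≤ (n : Int) + 1 := by
  have hm := PySem.Dict.mem_items_of_get?_eq_some _ h
  rw [pvBDict_items, List.mem_map] at hm
  obtain ⟨a, ha, heq⟩ := hm
  rw [PySem.List.mem_pyRange_one] at ha
  obtain ⟨h1, h2⟩ := Prod.mk.injEq .. ▸ heq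
  constructor
  · rw [← h1, h2]
  · omega

-- ---- the boolean table built by B ----

theorem pvBMark_nil (d : PySem.Dict String Int) (u : List Bool) :
    pvBMark d [] u = u := rfl

theorem pvBMark_cons (d : PySem.Dict String Int) (s : String) (rest : List String)
    (u : List Bool) :
    pvBMark d (s :: rest) u =
      pvBMark d rest (match d.get? s with
        | some k => u.set k.toNat true
        | none => u) := rfl

theorem pvBMark_length (d : PySem.Dict String Int) (arr : List String) :
    ∀ u : List Bool, (pvBMark d arr u).length = u.length := by
  induction arr with
  | nil => intro u; rfl
  | cons s rest ih =>
    intro u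
    rw [pvBMark_cons]
    cases h : d.get? s with
    | none => exact ih u
    | some k => rw [show (match some k with
        | some k => u.set k.toNat true
        | none => u) = u.set k.toNat true from rfl, ih (u.set k.toNat true)]; simp

theorem pvBMark_getD (filename : String) (n : Nat) (arr : List String) :
    ∀ (u : List Bool), u.length = n + 2 → ∀ t : Nat,
      (pvBMark (pvBDict filename n) arr u).getD t false =
        (u.getD t false || arr.any (fun s => (pvBDict filename n).get? s == some (t : Int))) := by
  induction arr with
  | nil => intro u _ t; rw [pvBMark_nil]; simp
  | cons s rest ih =>
    intro u hu t
    rw [pvBMark_cons]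
    cases h : (pvBDict filename n).get? s with
    | none =>
      rw [show (match (none : Option Int) with
        | some k => u.set k.toNat true
        | none => u) = u from rfl, ih u hu t]
      simp [h, List.any_cons]
    | some k =>
      obtain ⟨hs, hk1, hk2⟩ := pvBDict_get_some filename n h
      rw [show (match some k with
        | some k => u.set k.toNat true
        | none => u) = u.set k.toNat true from rfl,
        ih (u.set k.toNat true) (by simp [hu]) t]
      by_cases hkt : k.toNat = t
      · have hkt' : k = (t : Int) := by omega
        have hget : (u.set k.toNat true).getD t false = true := by
          rw [List.getD_eq_getElem?_getD, List.getElem?_set]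
          simp [hkt, show t < u.length by omega]
        rw [hget, List.any_cons, h, hkt']
        simp only [beq_self_eq_true, Bool.true_or, Bool.or_true]
      · have hget : (u.set k.toNat true).getD t false = u.getD t false := by
          rw [List.getD_eq_getElem?_getD, List.getElem?_set, if_neg hkt,
            ← List.getD_eq_getElem?_getD]
        have hne : (some k == some (t : Int)) = false := by
          simp; omega
        rw [hget, List.any_cons, h, hne]
        simp only [Bool.false_or]

-- the finished table reads: index t is used iff 1 ≤ t ≤ n+1 and candidate t occurs in arr
theorem pvUsed_getD (filename : String) (arr : List String) (t : Nat) :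
    (pvBMark (pvBDict filename arr.length) arr
        (List.replicate (arr.length + 2) false)).getD t false = true ↔
      (1 ≤ t ∧ t ≤ arr.length + 1 ∧ pvC filename (t : Int) ∈ arr) := by
  rw [pvBMark_getD filename arr.length arr _ (by simp) t]
  have hrep : (List.replicate (arr.length + 2) false).getD t false = false := by
    rw [List.getD_eq_getElem?_getD, List.getElem?_replicate]
    split <;> rfl
  rw [hrep, Bool.false_or, List.any_eq_true]
  constructor
  · rintro ⟨s, hs, hbeq⟩
    have h : (pvBDict filename arr.length).get? s = some (t : Int) := by
      simpa using hbeq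
    obtain ⟨hse, h1, h2⟩ := pvBDict_get_some filename arr.length h
    exact ⟨by omega, by omega, hse ▸ hs⟩
  · rintro ⟨h1, h2, hmem⟩
    refine ⟨pvC filename (t : Int), hmem, ?_⟩
    simp [pvBDict_get_cand filename arr.length (by omega : (1:Int) ≤ (t:Int)) (by push_cast; omega)]

-- ---- pigeonhole: some index in 1..n+1 is free ----

theorem pvFree_exists (filename : String) (arr : List String) :
    ∃ t : Nat, 1 ≤ t ∧ t ≤ arr.length + 1 ∧ pvC filename (t : Int) ∉ arr := by
  by_contra hall
  push_neg at hall
  have hsub : ((PySem.List.pyRange 1 ((arr.length : Int) + 2) 1).map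
      (pvC filename)).toFinset ⊆ arr.toFinset := by
    intro x hx
    rw [List.mem_toFinset, List.mem_map] at hx
    obtain ⟨i, hi, rfl⟩ := hx
    rw [PySem.List.mem_pyRange_one] at hi
    rw [List.mem_toFinset]
    have : i = ((i.toNat : Nat) : Int) := by omega
    rw [this]
    exact hall i.toNat (by omega) (by omega)
  have hnd : ((PySem.List.pyRange 1 ((arr.length : Int) + 2) 1).map (pvC filename)).Nodup := by
    refine List.Nodup.map_on ?_ (PySem.List.nodup_pyRange_one _ _)
    intro x hx y hy hxy
    rw [PySem.List.mem_pyRange_one] at hx hy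
    exact pvC_inj filename (by omega) (by omega) hxy
  have hc1 : ((PySem.List.pyRange 1 ((arr.length : Int) + 2) 1).map
      (pvC filename)).toFinset.card = arr.length + 1 := by
    rw [List.toFinset_card_of_nodup hnd, List.length_map, PySem.List.length_pyRange_one]
    omega
  have hc2 : arr.toFinset.card ≤ arr.length := List.toFinset_card_le arr
  have := Finset.card_le_card hsub
  omega

-- ===== THE COMMON FIRST FREE INDEX =====

-- B's while loop finds the least free index
theorem pvBWhile_eq (filename : String) (arr : List String)
    (i0 : Nat) (hfree : pvC filename (i0 : Int) ∉ arr)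
    (hmin : ∀ j : Nat, 1 ≤ j → j < i0 → pvC filename (j : Int) ∈ arr)
    (hle : i0 ≤ arr.length + 1) :
    ∀ (fuel k : Nat), 1 ≤ k → k ≤ i0 → i0 + 1 ≤ k + fuel →
      pvBWhile (pvBMark (pvBDict filename arr.length) arr
        (List.replicate (arr.length + 2) false)) k fuel = i0 := by
  intro fuel
  induction fuel with
  | zero => intro k _ _ _; omega
  | succ f ih =>
    intro k hk1 hk2 hk3
    unfold pvBWhile
    by_cases hk : k = i0
    · have : (pvBMark (pvBDict filename arr.length) arr
          (List.replicate (arr.length + 2) false)).getD k false = false := by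
        rw [Bool.eq_false_iff]
        intro hT
        rw [pvUsed_getD] at hT
        exact hfree (hk ▸ hT.2.2)
      rw [this]
      simpa using hk
    · have hmem := hmin k hk1 (by omega)
      have : (pvBMark (pvBDict filename arr.length) arr
          (List.replicate (arr.length + 2) false)).getD k false = true := by
        rw [pvUsed_getD]
        exact ⟨hk1, by omega, hmem⟩
      rw [this]
      simp only [if_true]
      exact ih (k + 1) (by omega) (by omega) (by omega)

-- A's flag fold is plain (negated) membership
theorem pvAInner_false (arr : List String) (c : String) :
    arr.foldl (fun f s => if s == c then false else f) false = false := by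
  induction arr with
  | nil => rfl
  | cons x xs ih =>
    rw [List.foldl_cons]
    by_cases hx : (x == c) = true
    · rw [if_pos hx]; exact ih
    · rw [if_neg hx]; exact ih

theorem pvAInner_eq (arr : List String) (c : String) :
    pvAInner arr c = !(arr.contains c) := by
  unfold pvAInner
  induction arr with
  | nil => rfl
  | cons x xs ih =>
    rw [List.foldl_cons]
    by_cases hx : (x == c) = true
    · rw [if_pos hx, pvAInner_false]
      simp [(by simpa using hx : x = c)]
    · rw [if_neg hx, ih]
      simp [Ne.symm (by simpa using hx : x ≠ c)]

-- A's outer loop also finds the least free index (the post-loop fallback is the case lo = i0 = n+1)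
theorem pvALoop_eq (filename : String) (arr : List String)
    (i0 : Nat) (hfree : pvC filename (i0 : Int) ∉ arr)
    (hmin : ∀ j : Nat, 1 ≤ j → j < i0 → pvC filename (j : Int) ∈ arr) :
    ∀ (m lo : Nat), 1 ≤ lo → lo ≤ i0 → i0 ≤ lo + m →
      pvALoop arr filename (PySem.List.pyRange (lo : Int) ((lo : Int) + (m : Int)) 1)
        ((lo : Int) - 1) = pvC filename (i0 : Int) := by
  intro m
  induction m with
  | zero =>
    intro lo h1 h2 h3
    rw [show (lo : Int) + ((0 : Nat) : Int) = (lo : Int) by omega,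
      PySem.List.pyRange_one_eq_nil (by omega)]
    show pvC filename ((lo : Int) - 1 + 1) = _
    have : lo = i0 := by omega
    rw [show (lo : Int) - 1 + 1 = (lo : Int) by omega, this]
  | succ m ih =>
    intro lo h1 h2 h3
    rw [PySem.List.pyRange_one_cons (by push_cast; omega)]
    show (if pvAInner arr (pvC filename (lo : Int)) then pvC filename (lo : Int)
      else pvALoop arr filename
        (PySem.List.pyRange ((lo : Int) + 1) ((lo : Int) + ((m + 1 : Nat) : Int)) 1)
        (lo : Int)) = _
    rw [pvAInner_eq]
    by_cases hlo : lo = i0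
    · have : arr.contains (pvC filename (lo : Int)) = false := by
        rw [← Bool.not_eq_true, List.contains_eq_mem]
        simpa [hlo] using hfree
      rw [this]
      simp [hlo]
    · have hmem := hmin lo h1 (by omega)
      have : arr.contains (pvC filename (lo : Int)) = true := by
        rw [List.contains_eq_mem]; simpa using hmem
      rw [this]
      simp only [Bool.not_true]
      have hrec := ih (lo + 1) (by omega) (by omega) (by omega)
      rw [show ((lo + 1 : Nat) : Int) - 1 = (lo : Int) by push_cast; omega] at hrec
      rw [show (lo : Int) + ((m + 1 : Nat) : Int) = ((lo + 1 : Nat) : Int) + ((m : Nat) : Int)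
        by push_cast; omega]
      exact hrec

-- ===== VERDICT (by name: the statement is the Claim_ definition above) =====
theorem get_secondary_filename_spec : Claim_equal_get_secondary_filename := by
  intro arr filename _
  show get_secondary_filename arr filename = get_secondary_filename_alt arr filename
  -- the least free index
  have hex := pvFree_exists filename arr
  have hex' : ∃ t : Nat, 1 ≤ t ∧ pvC filename (t : Int) ∉ arr := by
    obtain ⟨t, h1, _, h3⟩ := hex
    exact ⟨t, h1, h3⟩
  set i0 := Nat.find hex' with hi0def
  obtain ⟨hi01, hi0free⟩ := Nat.find_spec hex'
  have hi0min : ∀ j : Nat, 1 ≤ j → j < i0 → pvC filename (j : Int) ∈ arr := by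
    intro j hj1 hj2
    have := Nat.find_min hex' hj2
    push_neg at this
    exact this hj1
  have hi0le : i0 ≤ arr.length + 1 := by
    obtain ⟨t, h1, h2, h3⟩ := hex
    exact le_trans (Nat.find_min' hex' ⟨h1, h3⟩) h2
  -- A's side
  have hA : get_secondary_filename arr filename = pvC filename (i0 : Int) := by
    unfold get_secondary_filename
    have := pvALoop_eq filename arr i0 hi0free hi0min arr.length 1 (by omega) (by omega)
      (by omega)
    rw [show ((1 : Nat) : Int) + ((arr.length : Nat) : Int) = (arr.length : Int) + 1
      by push_cast; omega] at this
    simpa using this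
  -- B's side
  have hB : get_secondary_filename_alt arr filename = pvC filename (i0 : Int) := by
    unfold get_secondary_filename_alt
    simp only
    have hlen : (pvBMark (pvBDict filename arr.length) arr
        (List.replicate (arr.length + 2) false)).length = arr.length + 2 := by
      rw [pvBMark_length]; simp
    rw [hlen]
    rw [pvBWhile_eq filename arr i0 hi0free hi0min hi0le (arr.length + 2) 1
      (by omega) (by omega) (by omega)]
    rfl
  rw [hA, hB]
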